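-- pv_equiv track=rewrite | github.com/HrudaiKoda/Web-Crawling-Players | templates/render_info.py | teams6
-- ===== SOURCE A (Python) =====
-- def teams6(tea,Nationality):
--     Iteam = []
--     NonIteam = []
--     li = []
--     for i in tea:
--         if Nationality in i:
--             Iteam.append(i)
--         else:
--             NonIteam.append(i)
--     if len(Iteam) < 7:
--         li = Iteam + NonIteam
--     else:
--         li = Iteam[:6]
--     if len(li) < 7:
--         return li
--     else:
--         return li[:6]
-- ===== SOURCE B (Python) =====
-- def teams6(tea, Nationality):
--     # Stable sort: rows containing Nationality first (key False < True), keep at most 6.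
--     return sorted(tea, key=lambda i: Nationality not in i)[:6]
-- ===== Notes on version B (the rewrite author's own statement) =====
-- stated objective: simpler
-- what changed: Replaces the two-accumulator partition and the chained length branches by a single stable sort on the boolean key 'Nationality not in row' followed by one [:6] slice.
import Mathlib
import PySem

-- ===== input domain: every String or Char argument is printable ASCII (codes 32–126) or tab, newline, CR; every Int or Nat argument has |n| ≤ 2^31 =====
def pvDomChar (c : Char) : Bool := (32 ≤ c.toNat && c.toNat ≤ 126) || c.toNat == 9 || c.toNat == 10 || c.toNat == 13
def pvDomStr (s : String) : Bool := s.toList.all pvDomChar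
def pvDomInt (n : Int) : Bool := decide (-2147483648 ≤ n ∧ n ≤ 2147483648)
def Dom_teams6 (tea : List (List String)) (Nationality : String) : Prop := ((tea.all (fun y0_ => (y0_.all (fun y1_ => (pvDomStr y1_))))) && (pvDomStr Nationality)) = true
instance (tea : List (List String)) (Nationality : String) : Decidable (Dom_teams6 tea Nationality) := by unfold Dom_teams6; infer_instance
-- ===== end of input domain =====

-- B replaces A's two-accumulator partition and chained length branches by one stable
-- sort on the key "Nationality not in row" followed by a single [:6] slice (simpler).

-- ===== PORT A =====
def teams6 (tea : List (List String)) (Nationality : String) : List (List String) :=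
  -- the partition loop: Iteam/NonIteam grow by append, exactly as in the Python
  let p := tea.foldl
    (fun (acc : List (List String) × List (List String)) i =>
      if Nationality ∈ i then (acc.1 ++ [i], acc.2) else (acc.1, acc.2 ++ [i]))
    ([], [])
  let Iteam := p.1
  let NonIteam := p.2
  let li := if Iteam.length < 7 then Iteam ++ NonIteam
            else PySem.List.slice Iteam none (some 6)
  if li.length < 7 then li else PySem.List.slice li none (some 6)

-- ===== PORT B =====
-- sorted(tea, key=lambda i: Nationality not in i)[:6]; Python's bool key sorts as
-- the int 0/1, ported as such (False = 0, True = 1).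
def teams6_alt (tea : List (List String)) (Nationality : String) : List (List String) :=
  PySem.List.slice
    (PySem.List.sorted tea (fun i => if Nationality ∈ i then (0 : Int) else 1) false)
    none (some 6)

-- ===== PRECONDITION & SPEC =====
def Spec_teams6 (tea : List (List String)) (Nationality : String) (out : List (List String)) : Prop := out = teams6_alt tea Nationality
instance (tea : List (List String)) (Nationality : String) (out : List (List String)) : Decidable (Spec_teams6 tea Nationality out) := by unfold Spec_teams6; infer_instance

-- ===== CLAIM (what is proved, stated in full; the proofs are below) =====
def Claim_equal_teams6 : Prop := ∀ (tea : List (List String)) (Nationality : String), Dom_teams6 tea Nationality → Spec_teams6 tea Nationality (teams6 tea Nationality)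

-- ===== LEMMAS AND PROOFS =====

theorem slice_to_six {α : Type} (xs : List α) :
    PySem.List.slice xs none (some 6) = xs.take 6 := by
  have h := PySem.List.slice_to_natCast xs 6
  simpa using h

theorem insertBy_skip {α : Type} (before : α → α → Bool) (x : α) (F N : List α)
    (hF : ∀ y ∈ F, before x y = false) :
    PySem.List.insertBy before x (F ++ N) = F ++ PySem.List.insertBy before x N := by
  induction F with
  | nil => simp
  | cons f F ih =>
      have hf : before x f = false := hF f (by simp)
      simp [PySem.List.insertBy, hf, ih (fun y hy => hF y (by simp [hy]))]

theorem insertBy_front {α : Type} (before : α → α → Bool) (x : α) (N : List α)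
    (hN : ∀ y ∈ N, before x y = true) :
    PySem.List.insertBy before x N = x :: N := by
  cases N with
  | nil => rfl
  | cons y ys => simp [PySem.List.insertBy, hN y (by simp)]

-- the stable sort on the 0/1 key is exactly "matches then non-matches, in order"
theorem foldl_insertBy_partition {α : Type} (p : α → Bool) (xs F N : List α)
    (hF : ∀ y ∈ F, p y = true) (hN : ∀ y ∈ N, p y = false) :
    xs.foldl (fun acc x =>
        PySem.List.insertBy
          (fun a b => decide ((if p a then (0 : Int) else 1) < (if p b then (0 : Int) else 1)))
          x acc) (F ++ N)
      = (F ++ xs.filter p) ++ (N ++ xs.filter (fun y => !p y)) := by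
  induction xs generalizing F N with
  | nil => simp
  | cons x xs ih =>
      by_cases hx : p x = true
      · have hstep :
            PySem.List.insertBy
              (fun a b => decide ((if p a then (0 : Int) else 1) < (if p b then (0 : Int) else 1)))
              x (F ++ N) = (F ++ [x]) ++ N := by
          rw [insertBy_skip _ _ F N (fun y hy => by simp [hF y hy, hx]),
              insertBy_front _ _ N (fun y hy => by simp [hN y hy, hx])]
          simp
        have ih' := ih (F ++ [x]) N
          (fun y hy => by rcases List.mem_append.1 hy with h | h
                          · exact hF y h
                          · simp at h; simpa [h] using hx) hN
        rw [List.foldl_cons, hstep]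
        rw [ih']
        simp [hx]
      · have hx' : p x = false := by simpa using hx
        have hstep :
            PySem.List.insertBy
              (fun a b => decide ((if p a then (0 : Int) else 1) < (if p b then (0 : Int) else 1)))
              x (F ++ N) = F ++ (N ++ [x]) := by
          rw [← List.append_assoc]
          exact PySem.List.insertBy_of_forall_not_before _ _ _
            (fun y _ => by by_cases h : p y = true <;> simp_all)
        have ih' := ih F (N ++ [x]) hF
          (fun y hy => by rcases List.mem_append.1 hy with h | h
                          · exact hN y h
                          · simp at h; simpa [h] using hx')
        simp [List.foldl_cons, hstep, ih', hx']

theorem sorted_bool_key (tea : List (List String)) (Nationality : String) :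
    PySem.List.sorted tea (fun i => if Nationality ∈ i then (0 : Int) else 1) false
      = tea.filter (fun i => decide (Nationality ∈ i))
        ++ tea.filter (fun i => !decide (Nationality ∈ i)) := by
  have h := foldl_insertBy_partition (fun i => decide (Nationality ∈ i)) tea [] []
    (by simp) (by simp)
  simp only [List.nil_append, List.append_nil] at h
  simp only [PySem.List.sorted]
  convert h using 2
  funext acc x
  congr 1
  funext a b
  by_cases ha : Nationality ∈ a <;> by_cases hb : Nationality ∈ b <;> simp [ha, hb]

-- A's partition loop computes the two filters
theorem foldl_partition (tea F N : List (List String)) (Nationality : String) :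
    tea.foldl
      (fun (acc : List (List String) × List (List String)) i =>
        if Nationality ∈ i then (acc.1 ++ [i], acc.2) else (acc.1, acc.2 ++ [i]))
      (F, N)
    = (F ++ tea.filter (fun i => decide (Nationality ∈ i)),
       N ++ tea.filter (fun i => !decide (Nationality ∈ i))) := by
  induction tea generalizing F N with
  | nil => simp
  | cons x xs ih =>
      by_cases hx : Nationality ∈ x <;>
        simp [List.foldl_cons, hx, ih]

-- ===== VERDICT (by name: the statement is the Claim_ definition above) =====
theorem teams6_spec : Claim_equal_teams6 := by
  intro tea Nationality _
  unfold Spec_teams6 teams6 teams6_alt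
  rw [sorted_bool_key, slice_to_six, foldl_partition]
  simp only [List.nil_append]
  set F := tea.filter (fun i => decide (Nationality ∈ i)) with hFdef
  set N := tea.filter (fun i => !decide (Nationality ∈ i)) with hNdef
  by_cases h7 : F.length < 7
  · simp only [h7, if_true]
    by_cases hlen : (F ++ N).length < 7
    · simp only [hlen, if_true]
      haveI : (F ++ N).length ≤ 6 := by omega
      exact (List.take_of_length_le this).symm
    · simp only [hlen, if_false, slice_to_six]
  · have h6 : 6 ≤ F.length := by omega
    simp only [h7, if_false, slice_to_six]
    have hlen : (F.take 6).length < 7 := by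
      simp [List.length_take]
    simp only [hlen, if_true]
    rw [List.take_append_of_le_length h6]
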